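-- pv_equiv track=rewrite | github.com/Kris465/MemoryBox | block6/main41.py | find_max_and_min_digits
-- ===== SOURCE A (Python) =====
-- def find_max_and_min_digits(n):
--     # Преобразуем число в строку для удобства итерации по цифрам
--     digits = [int(d) for d in str(n)]
--
--     # Инициализируем переменные для хранения максимальных и минимальных цифр
--     max1 = max2 = -1
--     min1 = min2 = 10
--
--     # Проходим по всем цифрам числа
--     for digit in digits:
--         # Находим две максимальные цифры
--         if digit > max1:
--             max2 = max1
--             max1 = digit
--         elif digit > max2:
--             max2 = digit
--
--         # Находим две минимальные цифры
--         if digit < min1: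
--             min2 = min1
--             min1 = digit
--         elif digit < min2:
--             min2 = digit
--
--     return (max1, max2), (min1, min2)
-- ===== SOURCE B (Python) =====
-- def find_max_and_min_digits(n):
--     s = sorted(int(d) for d in str(n))
--     if len(s) == 1:
--         return (s[0], -1), (s[0], 10)
--     return (s[-1], s[-2]), (s[0], s[1])
-- ===== Notes on version B (the rewrite author's own statement) =====
-- stated objective: simpler
-- what changed: Replaces the single-pass four-variable min/max tracking loop by sorting the digit list once and reading the two largest and two smallest digits off the ends of the sorted list (the one-digit case keeps the -1/10 fill-in values).
import Mathlib
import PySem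

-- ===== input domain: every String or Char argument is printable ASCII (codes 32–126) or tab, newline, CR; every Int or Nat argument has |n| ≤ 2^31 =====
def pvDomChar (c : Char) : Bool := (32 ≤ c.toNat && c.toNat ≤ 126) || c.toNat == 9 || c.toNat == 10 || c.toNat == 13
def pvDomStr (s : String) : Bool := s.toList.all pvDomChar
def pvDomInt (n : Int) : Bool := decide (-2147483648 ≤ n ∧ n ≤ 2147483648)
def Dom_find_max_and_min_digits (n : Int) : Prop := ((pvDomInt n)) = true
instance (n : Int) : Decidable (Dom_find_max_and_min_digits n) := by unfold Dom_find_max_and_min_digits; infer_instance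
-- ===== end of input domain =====

-- B replaces A's single-pass four-variable min/max tracking by sorting the digits once and
-- reading the two largest / two smallest digits off the ends of the sorted list (simpler).

-- ===== PORT A =====
-- digits = [int(d) for d in str(n)]; int(d) is total-formed with .getD 0 — under Pre_ (0 ≤ n)
-- every character of str(n) is a decimal digit, so ofChars? is `some` there (A raises ValueError
-- on the '-' character when n < 0, which Pre_ excludes).
def pvDigits (n : Int) : List Int :=
  (PySem.Int.toChars n).map (fun c => (PySem.Int.ofChars? [c]).getD 0)

-- A's loop body, split into its two independent halves: the (max1, max2) update and the
-- (min1, min2) update (branches in A's order)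
def pvMaxStep (p : Int × Int) (digit : Int) : Int × Int :=
  if digit > p.1 then (digit, p.1) else if digit > p.2 then (p.1, digit) else p

def pvMinStep (p : Int × Int) (digit : Int) : Int × Int :=
  if digit < p.1 then (digit, p.1) else if digit < p.2 then (p.1, digit) else p

def pvStep (s : (Int × Int) × (Int × Int)) (digit : Int) : (Int × Int) × (Int × Int) :=
  (pvMaxStep s.1 digit, pvMinStep s.2 digit)

def find_max_and_min_digits (n : Int) : (Int × Int) × (Int × Int) :=
  (pvDigits n).foldl pvStep ((-1, -1), (10, 10))

-- ===== PORT B =====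
-- s = sorted(digits); one-digit case keeps the -1/10 fill-ins, otherwise the answer is read off
-- the ends of s.  s is never empty (str(n) is nonempty), so the pyGetD defaults are never taken.
def find_max_and_min_digits_alt (n : Int) : (Int × Int) × (Int × Int) :=
  let s := PySem.List.sorted (pvDigits n) (fun x => x) false
  if PySem.List.len s = 1 then
    ((PySem.List.pyGetD s 0 0, -1), (PySem.List.pyGetD s 0 0, 10))
  else
    ((PySem.List.pyGetD s (-1) 0, PySem.List.pyGetD s (-2) 0),
     (PySem.List.pyGetD s 0 0, PySem.List.pyGetD s 1 0))

-- ===== PRECONDITION & SPEC =====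
-- Pre_ excludes exactly n < 0: there str(n) starts with '-' and int('-') raises ValueError in A
-- (and in B, which extracts digits the same way).
def Pre_find_max_and_min_digits (n : Int) : Prop := 0 ≤ n
instance (n : Int) : Decidable (Pre_find_max_and_min_digits n) := by unfold Pre_find_max_and_min_digits; infer_instance

def pvWitness_find_max_and_min_digits : Int := 42

def Spec_find_max_and_min_digits (n : Int) (out : (Int × Int) × (Int × Int)) : Prop := out = find_max_and_min_digits_alt n
instance (n : Int) (out : (Int × Int) × (Int × Int)) : Decidable (Spec_find_max_and_min_digits n out) := by unfold Spec_find_max_and_min_digits; infer_instance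

-- ===== CLAIM (what is proved, stated in full; the proofs are below) =====
def Claim_equal_find_max_and_min_digits : Prop := ∀ (n : Int), Dom_find_max_and_min_digits n → Pre_find_max_and_min_digits n → Spec_find_max_and_min_digits n (find_max_and_min_digits n)

-- ===== LEMMAS AND PROOFS =====

-- A's loop body is right-commutative, so its fold is permutation-invariant.
theorem pvMaxStep_comm (p : Int × Int) (a b : Int) :
    pvMaxStep (pvMaxStep p a) b = pvMaxStep (pvMaxStep p b) a := by
  obtain ⟨m1, m2⟩ := p
  simp only [pvMaxStep]
  split_ifs <;> simp_all [Prod.ext_iff] <;> omega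

theorem pvMinStep_comm (p : Int × Int) (a b : Int) :
    pvMinStep (pvMinStep p a) b = pvMinStep (pvMinStep p b) a := by
  obtain ⟨m1, m2⟩ := p
  simp only [pvMinStep]
  split_ifs <;> simp_all [Prod.ext_iff] <;> omega

theorem pvStep_comm (s : (Int × Int) × (Int × Int)) (a b : Int) :
    pvStep (pvStep s a) b = pvStep (pvStep s b) a := by
  simp only [pvStep, pvMaxStep_comm, pvMinStep_comm]

theorem pv_toDigitsCore_eq_nil (f : Nat) : ∀ (n : Nat) (ds : List Char),
    Nat.toDigitsCore 10 f n ds = [] → ds = [] := by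
  induction f with
  | zero => intro n ds h; exact h
  | succ f ih =>
    intro n ds h
    simp only [Nat.toDigitsCore] at h
    split at h
    · exact absurd h (by simp)
    · exact absurd (ih _ _ h) (by simp)

theorem pv_toDigits_ne_nil (m : Nat) : Nat.toDigits 10 m ≠ [] := by
  intro h
  unfold Nat.toDigits at h
  simp only [Nat.toDigitsCore] at h
  split at h
  · simp at h
  · exact absurd (pv_toDigitsCore_eq_nil _ _ _ h) (by simp)

theorem pv_digitChar_mem (k : Nat) (hk : k < 10) :
    Nat.digitChar k ∈ ['0','1','2','3','4','5','6','7','8','9'] := by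
  interval_cases k <;> decide

theorem pv_toDigitsCore_mem (f : Nat) : ∀ (n : Nat) (ds : List Char) (c : Char),
    c ∈ Nat.toDigitsCore 10 f n ds → c ∈ ds ∨ c ∈ ['0','1','2','3','4','5','6','7','8','9'] := by
  induction f with
  | zero => intro n ds c h; exact Or.inl h
  | succ f ih =>
    intro n ds c h
    simp only [Nat.toDigitsCore] at h
    split at h
    · rcases List.mem_cons.mp h with h | h
      · exact Or.inr (h ▸ pv_digitChar_mem _ (Nat.mod_lt _ (by omega)))
      · exact Or.inl h
    · rcases ih _ _ _ h with h | h
      · rcases List.mem_cons.mp h with h | h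
        · exact Or.inr (h ▸ pv_digitChar_mem _ (Nat.mod_lt _ (by omega)))
        · exact Or.inl h
      · exact Or.inr h

theorem pv_toDigits_mem (m : Nat) (c : Char) (h : c ∈ Nat.toDigits 10 m) :
    c ∈ ['0','1','2','3','4','5','6','7','8','9'] := by
  rcases pv_toDigitsCore_mem _ _ _ _ h with h | h
  · simp at h
  · exact h

theorem pv_digit_val_bounds (c : Char) (h : c ∈ ['0','1','2','3','4','5','6','7','8','9']) :
    0 ≤ (PySem.Int.ofChars? [c]).getD 0 ∧ (PySem.Int.ofChars? [c]).getD 0 ≤ 9 := by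
  fin_cases h <;> decide

theorem pvDigits_bounds (n : Int) (hn : 0 ≤ n) : ∀ x ∈ pvDigits n, 0 ≤ x ∧ x ≤ 9 := by
  intro x hx
  simp only [pvDigits, List.mem_map] at hx
  obtain ⟨c, hc, rfl⟩ := hx
  have hc' : c ∈ Nat.toDigits 10 n.toNat := by
    simpa [PySem.Int.toChars, not_lt.mpr hn] using hc
  exact pv_digit_val_bounds c (pv_toDigits_mem _ _ hc')

theorem pvDigits_ne_nil (n : Int) : pvDigits n ≠ [] := by
  simp only [pvDigits, ne_eq, List.map_eq_nil_iff, PySem.Int.toChars]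
  split
  · simp
  · exact pv_toDigits_ne_nil _

theorem pvMaxStep_ge (m1 m2 x : Int) (h2 : m2 ≤ m1) (h1 : m1 ≤ x) :
    pvMaxStep (m1, m2) x = (x, m1) := by
  simp only [pvMaxStep]
  split_ifs <;> simp [Prod.ext_iff] <;> omega

theorem pvMinStep_le (n1 n2 x : Int) (h1 : x ≤ n1) (h2 : n1 ≤ n2) :
    pvMinStep (n1, n2) x = (x, n1) := by
  simp only [pvMinStep]
  split_ifs <;> simp [Prod.ext_iff] <;> omega

theorem pvMinStep_mid (n1 n2 x : Int) (h1 : n1 ≤ x) (h2 : x < n2) :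
    pvMinStep (n1, n2) x = (n1, x) := by
  simp only [pvMinStep]
  split_ifs <;> simp [Prod.ext_iff]
  omega

theorem pvMinStep_ge (n1 n2 x : Int) (h1 : n1 ≤ n2) (h2 : n2 ≤ x) :
    pvMinStep (n1, n2) x = (n1, n2) := by
  simp only [pvMinStep]
  split_ifs <;> simp [Prod.ext_iff] <;> omega

-- folding A's loop body over a sorted tail from a saturated state
theorem pv_fold_sorted (t : List Int) : ∀ (m1 m2 n1 n2 : Int),
    List.Pairwise (· ≤ ·) t → (∀ x ∈ t, m1 ≤ x) → m2 ≤ m1 → (∀ x ∈ t, n2 ≤ x) → n1 ≤ n2 →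
    List.foldl pvStep ((m1, m2), (n1, n2)) t
      = (((m1 :: t).getLastD 0, ((m2 :: m1 :: t).dropLast).getLastD 0), (n1, n2)) := by
  induction t with
  | nil => intro m1 m2 n1 n2 _ _ _ _ _; simp
  | cons x t ih =>
    intro m1 m2 n1 n2 hs hm1 hm2 hn2 hn1
    have hx : m1 ≤ x := hm1 x (by simp)
    have hnx : n2 ≤ x := hn2 x (by simp)
    have hstep : pvStep ((m1, m2), (n1, n2)) x = ((x, m1), (n1, n2)) := by
      simp only [pvStep]
      rw [pvMaxStep_ge m1 m2 x hm2 hx, pvMinStep_ge n1 n2 x hn1 hnx]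
    have hall : ∀ y ∈ t, x ≤ y := fun y hy => (List.pairwise_cons.mp hs).1 y hy
    rw [List.foldl_cons, hstep,
      ih x m1 n1 n2 (List.pairwise_cons.mp hs).2 hall hx (fun y hy => le_trans hnx (hall y hy)) hn1]
    simp [List.dropLast_cons₂, List.getLastD_eq_getLast?]

theorem pv_getLastD (l : List Int) : ∀ c d : Int, (c :: l).getLast?.getD d = l.getLast?.getD c := by
  induction l with
  | nil => intro c d; simp
  | cons x l ih => intro c d; simp only [List.getLast?_cons_cons]; rw [ih x d, ← ih x c]

-- the last-but-one entry of a ≥2-element list, in the two shapes the two sides use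
theorem pv_penult (t : List Int) : ∀ (a b : Int),
    ((a :: b :: t).dropLast).getLastD 0 = (a :: b :: t).getD t.length 0 := by
  induction t with
  | nil => intro a b; simp
  | cons x t ih =>
    intro a b
    have h := ih b x
    simp only [List.dropLast_cons₂] at h ⊢
    simp [List.getLastD_eq_getLast?, List.getLast?_cons] at h ⊢
    simpa using h

theorem pv_main (n : Int) (hn : 0 ≤ n) :
    find_max_and_min_digits n = find_max_and_min_digits_alt n := by
  have hperm : (PySem.List.sorted (pvDigits n) (fun x => x) false).Perm (pvDigits n) :=
    PySem.List.sorted_perm _ _ _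
  have hA : find_max_and_min_digits n
      = List.foldl pvStep ((-1, -1), (10, 10)) (PySem.List.sorted (pvDigits n) (fun x => x) false) := by
    unfold find_max_and_min_digits
    exact (List.Perm.foldl_eq' hperm (fun x _ y _ z => pvStep_comm z x y) _).symm
  have hpair : List.Pairwise (· ≤ ·) (PySem.List.sorted (pvDigits n) (fun x => x) false) :=
    PySem.List.sorted_pairwise _ _
  have hbound : ∀ x ∈ PySem.List.sorted (pvDigits n) (fun x => x) false, 0 ≤ x ∧ x ≤ 9 :=
    fun x hx => pvDigits_bounds n hn x (hperm.mem_iff.mp hx)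
  have hne : PySem.List.sorted (pvDigits n) (fun x => x) false ≠ [] := by
    rw [Ne, PySem.List.sorted_eq_nil_iff]; exact pvDigits_ne_nil n
  rw [hA]
  unfold find_max_and_min_digits_alt
  rcases hs : PySem.List.sorted (pvDigits n) (fun x => x) false with _ | ⟨a, _ | ⟨b, t⟩⟩
  · exact absurd hs hne
  · -- single digit
    rw [hs] at hbound
    obtain ⟨ha0, ha9⟩ := hbound a (by simp)
    simp only [List.foldl_cons, List.foldl_nil, pvStep]
    rw [pvMaxStep_ge (-1) (-1) a le_rfl (by omega), pvMinStep_le 10 10 a (by omega) le_rfl]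
    simp [PySem.List.len_eq, PySem.List.pyGetD_zero_cons]
  · -- at least two digits
    rw [hs] at hbound hpair
    obtain ⟨ha0, ha9⟩ := hbound a (by simp)
    obtain ⟨hb0, hb9⟩ := hbound b (by simp)
    have hab : a ≤ b := (List.pairwise_cons.mp hpair).1 b (by simp)
    have hbt : ∀ x ∈ t, b ≤ x :=
      fun x hx => (List.pairwise_cons.mp (List.pairwise_cons.mp hpair).2).1 x hx
    have ht : List.Pairwise (· ≤ ·) t := (List.pairwise_cons.mp (List.pairwise_cons.mp hpair).2).2
    have hstep1 : pvStep ((-1, -1), (10, 10)) a = ((a, -1), (a, 10)) := by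
      simp only [pvStep]
      rw [pvMaxStep_ge (-1) (-1) a le_rfl (by omega), pvMinStep_le 10 10 a (by omega) le_rfl]
    have hstep2 : pvStep ((a, -1), (a, 10)) b = ((b, a), (a, b)) := by
      simp only [pvStep]
      rw [pvMaxStep_ge a (-1) b (by omega) hab, pvMinStep_mid a 10 b hab (by omega)]
    rw [List.foldl_cons, List.foldl_cons, hstep1, hstep2,
      pv_fold_sorted t b a a b ht hbt hab hbt hab]
    have hlen : ¬ PySem.List.len (a :: b :: t) = 1 := by
      simp [PySem.List.len_eq]; omega
    rw [if_neg hlen]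
    have h1 : PySem.List.pyGetD (a :: b :: t) (-1) 0 = (b :: t).getLastD 0 := by
      rw [PySem.List.pyGetD_neg_one (a :: b :: t) 0 (by simp)]
      rw [List.getLast_cons (by simp), List.getLast_eq_getLastD]
      simp only [List.getLastD_eq_getLast?]
      exact (pv_getLastD t b 0).symm
    have h2 : PySem.List.pyGetD (a :: b :: t) (-2) 0 = ((a :: b :: t).dropLast).getLastD 0 := by
      rw [PySem.List.pyGetD_neg_ofNat (a :: b :: t) 2 0 (by omega) (by simp)]
      rw [pv_penult t a b, List.getD_eq_getElem (a :: b :: t) 0 (by simp)]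
      rfl
    have h3 : PySem.List.pyGetD (a :: b :: t) 1 0 = b := by
      rw [show (1 : Int) = ((1 : Nat) : Int) by norm_num, PySem.List.pyGetD_natCast]
      simp
    rw [h1, h2, h3, PySem.List.pyGetD_zero_cons]

-- ===== VERDICT (by name: the statement is the Claim_ definition above) =====
theorem find_max_and_min_digits_spec : Claim_equal_find_max_and_min_digits := by
  intro n _ hn
  exact pv_main n hn
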